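-- pv_equiv track=rewrite | github.com/VijaiVenkatesan/Agentic_AI_Resume_Chatbot | bulk_processor.py | _has_repetition_pattern
-- ===== SOURCE A (Python) =====
-- from typing import List, Dict, Any, Optional, Set, Tuple
--
-- def _has_repetition_pattern(text: str) -> bool:
--     if not text:
--         return False
--     words = text.split()
--     if len(words) < 3:
--         return False
--     for i in range(len(words) - 1):
--         w1 = words[i].lower().strip(".,;:()")
--         w2 = words[i + 1].lower().strip(".,;:()")
--         if w1 == w2 and len(w1) > 1:
--             return True
--     counts: Dict[str, int] = {}
--     for w in words:
--         key = w.lower().strip(".,;:()")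
--         if len(key) > 1:
--             counts[key] = counts.get(key, 0) + 1
--     return any(c >= 3 for c in counts.values())
-- ===== SOURCE B (Python) =====
-- def _has_repetition_pattern(text: str) -> bool:
--     if not text:
--         return False
--     words = text.split()
--     if len(words) < 3:
--         return False
--     prev = None
--     counts = {}
--     for w in words:
--         key = w.lower().strip(".,;:()")
--         if len(key) > 1:
--             if key == prev:
--                 return True
--             counts[key] = counts.get(key, 0) + 1
--         prev = key
--     return any(c >= 3 for c in counts.values())
-- ===== Notes on version B (the rewrite author's own statement) =====
-- stated objective: alternative
-- what changed: A's two sequential passes (an index-based adjacent-pair scan over range(len-1), then a separate counting loop building a dict) are fused into one single pass over the words that normalizes each word exactly once, carries the previous normalized key, and returns True immediately on an adjacent repeat.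
import Mathlib
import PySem

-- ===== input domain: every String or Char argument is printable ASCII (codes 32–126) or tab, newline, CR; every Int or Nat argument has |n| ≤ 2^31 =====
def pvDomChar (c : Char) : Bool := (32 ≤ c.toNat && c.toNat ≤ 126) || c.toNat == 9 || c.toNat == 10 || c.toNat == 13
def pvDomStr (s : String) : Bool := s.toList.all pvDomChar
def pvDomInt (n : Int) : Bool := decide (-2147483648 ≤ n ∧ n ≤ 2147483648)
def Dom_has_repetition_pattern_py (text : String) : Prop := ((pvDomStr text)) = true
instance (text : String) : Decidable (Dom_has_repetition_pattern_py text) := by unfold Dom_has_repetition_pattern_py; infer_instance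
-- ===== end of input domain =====

-- B fuses A's two sequential passes (adjacent-pair scan, then count dict) into one single pass
-- over the words, normalizing each word once (objective: alternative decomposition; not claimed faster).


-- ===== PORT A =====
-- w.lower().strip(".,;:()")

def pvNorm (w : String) : String := PySem.Str.stripChars (PySem.Str.lower w) ".,;:()"

def has_repetition_pattern_py (text : String) : Bool :=
  if text == "" then false
  else
    let words := PySem.Str.split₀ text
    if words.length < 3 then false
    else if (PySem.List.pyRange 0 ((words.length : Int) - 1) 1).any (fun i =>
        pvNorm (PySem.List.pyGetD words i "") == pvNorm (PySem.List.pyGetD words (i + 1) "")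
          && PySem.Str.len (pvNorm (PySem.List.pyGetD words i "")) > 1) then true
    else
      let counts : PySem.Dict String Int := words.foldl (fun d w =>
        if PySem.Str.len (pvNorm w) > 1 then d.insert (pvNorm w) (d.getD (pvNorm w) 0 + 1) else d)
        PySem.Dict.empty
      counts.values.any (fun c => c ≥ 3)

-- ===== PORT B =====
-- the single fused pass of Source B: carried previous key + running counts, early True on an adjacent repeat
def pvAltLoop (prev : Option String) (counts : PySem.Dict String Int) : List String → Bool
  | [] => counts.values.any (fun c => c ≥ 3)
  | w :: ws =>
    let key := pvNorm w
    if PySem.Str.len key > 1 then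
      if some key == prev then true
      else pvAltLoop (some key) (counts.insert key (counts.getD key 0 + 1)) ws
    else pvAltLoop (some key) counts ws

def has_repetition_pattern_py_alt (text : String) : Bool :=
  if text == "" then false
  else
    let words := PySem.Str.split₀ text
    if words.length < 3 then false
    else pvAltLoop none PySem.Dict.empty words

-- ===== PRECONDITION & SPEC =====
def Spec_has_repetition_pattern_py (text : String) (out : Bool) : Prop := out = has_repetition_pattern_py_alt text
instance (text : String) (out : Bool) : Decidable (Spec_has_repetition_pattern_py text out) := by unfold Spec_has_repetition_pattern_py; infer_instance

-- ===== CLAIM (what is proved, stated in full; the proofs are below) =====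
def Claim_equal_has_repetition_pattern_py : Prop := ∀ (text : String), Dom_has_repetition_pattern_py text → Spec_has_repetition_pattern_py text (has_repetition_pattern_py text)

-- ===== LEMMAS AND PROOFS =====
-- adjacent-repeat check on the list of normalized keys
def pvChain : List String → Bool
  | a :: b :: t => (a == b && PySem.Str.len b > 1) || pvChain (b :: t)
  | _ => false

-- B's adjacency check relative to a carried previous key
def pvChainP (prev : Option String) : List String → Bool
  | [] => false
  | k :: t => (decide (PySem.Str.len k > 1) && (some k == prev)) || pvChainP (some k) t

theorem pvPair (a b : String) :
    (a == b && decide (PySem.Str.len a > 1)) = (a == b && decide (PySem.Str.len b > 1)) := by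
  cases h : (a == b) with
  | false => simp
  | true => have : a = b := by simpa using h
            subst this; rfl

theorem pvNatAdj : ∀ (l : List String),
    (List.range (l.length - 1)).any (fun i =>
      pvNorm (l.getD i "") == pvNorm (l.getD (i + 1) "")
        && decide (PySem.Str.len (pvNorm (l.getD i "")) > 1))
    = pvChain (l.map pvNorm) := by
  intro l
  induction l with
  | nil => rfl
  | cons a l IH =>
    cases l with
    | nil => rfl
    | cons b t =>
      have hlen : (a :: b :: t).length - 1 = ((b :: t).length - 1) + 1 := by simp
      rw [hlen, List.range_succ_eq_map]
      simp only [List.any_cons, List.any_map, Function.comp_def, List.getD_cons_succ,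
        List.getD_cons_zero, Nat.succ_eq_add_one]
      simp only [List.getD_cons_succ] at IH
      rw [IH]
      simp only [List.map_cons]
      have hR : pvChain (pvNorm a :: pvNorm b :: List.map pvNorm t)
          = ((pvNorm a == pvNorm b && decide (PySem.Str.len (pvNorm b) > 1)) ||
             pvChain (pvNorm b :: List.map pvNorm t)) := rfl
      rw [hR, pvPair]

theorem pvRangeAdj (ws : List String) (h : ws ≠ []) :
    (PySem.List.pyRange 0 ((ws.length : Int) - 1) 1).any (fun i =>
      pvNorm (PySem.List.pyGetD ws i "") == pvNorm (PySem.List.pyGetD ws (i + 1) "")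
        && PySem.Str.len (pvNorm (PySem.List.pyGetD ws i "")) > 1)
    = pvChain (ws.map pvNorm) := by
  have h1 : ((ws.length : Int) - 1) = ((ws.length - 1 : Nat) : Int) := by
    have : 1 ≤ ws.length := List.length_pos_iff.mpr h
    push_cast [this]; ring
  rw [h1, PySem.List.pyRange_zero_natCast, List.any_map]
  rw [← pvNatAdj ws]
  simp only [Function.comp_def,
    show ∀ k : Nat, ((k : Int) + 1) = ((k + 1 : Nat) : Int) by intro k; push_cast; ring,
    PySem.List.pyGetD_natCast]

theorem pvChainP_some : ∀ (ks : List String) (a : String),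
    pvChainP (some a) ks = pvChain (a :: ks) := by
  intro ks
  induction ks with
  | nil => intro a; rfl
  | cons k t IH =>
    intro a
    simp only [pvChainP]
    rw [IH k]
    have h1 : ((some k : Option String) == some a) = (a == k) := by
      simp [eq_comm]
    have h2 : pvChain (a :: k :: t) = ((a == k && decide (PySem.Str.len k > 1)) || pvChain (k :: t)) := rfl
    rw [h2, h1, Bool.and_comm]

theorem pvChainP_none (ks : List String) : pvChainP none ks = pvChain ks := by
  cases ks with
  | nil => rfl
  | cons k t =>
    simp only [pvChainP]
    rw [pvChainP_some]
    simp

theorem pvAltLoop_eq : ∀ (ws : List String) (prev : Option String) (d : PySem.Dict String Int),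
    pvAltLoop prev d ws =
      (pvChainP prev (ws.map pvNorm) ||
       (((ws.map pvNorm).filter (fun k => decide (PySem.Str.len k > 1))).foldl
          (fun d k => d.insert k (d.getD k 0 + 1)) d).values.any (fun c => c ≥ 3)) := by
  intro ws
  induction ws with
  | nil => intro prev d; rfl
  | cons w ws IH =>
    intro prev d
    simp only [pvAltLoop, List.map_cons, pvChainP, List.filter_cons]
    by_cases hp : PySem.Str.len (pvNorm w) > 1
    · simp only [hp, if_true, decide_true, Bool.true_and]
      cases he : (some (pvNorm w) == prev) with
      | true => simp
      | false =>
        simp only [Bool.false_or, Bool.false_eq_true, if_false]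
        rw [IH, List.foldl_cons]
    · simp only [hp, if_false, decide_false, Bool.false_and, Bool.false_or,
        Bool.false_eq_true]
      rw [IH]

theorem pvCountsEq (ws : List String) :
    ws.foldl (fun d w =>
        if PySem.Str.len (pvNorm w) > 1 then d.insert (pvNorm w) (d.getD (pvNorm w) 0 + 1) else d)
      (PySem.Dict.empty : PySem.Dict String Int)
    = ((ws.map pvNorm).filter (fun k => decide (PySem.Str.len k > 1))).foldl
        (fun d k => d.insert k (d.getD k 0 + 1)) (PySem.Dict.empty : PySem.Dict String Int) := by
  rw [← PySem.List.foldl_if_eq_foldl_filter, List.foldl_map]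
  simp only [decide_eq_true_eq]

-- ===== VERDICT (by name: the statement is the Claim_ definition above) =====
theorem has_repetition_pattern_py_spec : Claim_equal_has_repetition_pattern_py := by
  intro text _
  show has_repetition_pattern_py text = has_repetition_pattern_py_alt text
  unfold has_repetition_pattern_py has_repetition_pattern_py_alt
  cases h0 : (text == "") with
  | true => rfl
  | false =>
    simp only [Bool.false_eq_true, if_false]
    by_cases h3 : (PySem.Str.split₀ text).length < 3
    · rw [if_pos h3, if_pos h3]
    · rw [if_neg h3, if_neg h3]
      have hne : PySem.Str.split₀ text ≠ [] := by
        intro h; rw [h] at h3; simp at h3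
      rw [pvAltLoop_eq, pvChainP_none, pvRangeAdj _ hne]
      rw [pvCountsEq]
      cases hch : pvChain ((PySem.Str.split₀ text).map pvNorm) with
      | true => simp
      | false => simp
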